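-- pv_equiv track=rewrite | github.com/Chaosum/Data-Science | 0_Data_engineer/ex04/items_table.py | ensure_n_types
-- ===== SOURCE A (Python) =====
-- def ensure_n_types(types, n):
--     """Ensure that there are at least n unique types in the list.
--     If there are not enough unique types, replace some with predefined types.
--     Returns a list of types with at least n unique types.
--     """
--     unique = set(types)
--     if len(unique) >= n:
--         return types
--
--     replacements = {
--         'INTEGER': 'BIGINT',
--         'VARCHAR(255)': 'TEXT',
--         'NUMERIC(10, 2)': 'FLOAT',
--         'UUID': 'CHAR(36)'
--     }
--
--     updated_types = types.copy()
--     type_encountered = set()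
--     for i, t in enumerate(updated_types):
--         if len(set(updated_types)) >= n:
--             break
--
--         if t in type_encountered and t in replacements:
--             updated_types[i] = replacements[t]
--             unique = set(updated_types)
--         else:
--             type_encountered.add(t)
--
--     return updated_types
-- ===== SOURCE B (Python) =====
-- def ensure_n_types(types, n):
--     """Ensure that there are at least n unique types in the list.
--     Staged: pass 1 only computes the cutoff index j (tracking the distinct
--     count incrementally), pass 2 rebuilds the output list without mutation.
--     """
--     replacements = {
--         'INTEGER': 'BIGINT',
--         'VARCHAR(255)': 'TEXT',
--         'NUMERIC(10, 2)': 'FLOAT',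
--         'UUID': 'CHAR(36)'
--     }
--     present = set(types)
--     distinct = len(present)
--     if distinct >= n:
--         return types
--
--     # pass 1: find the cutoff index j after which no replacement happens
--     seen = set()
--     j = len(types)
--     for i, t in enumerate(types):
--         if distinct >= n:
--             j = i
--             break
--         if t in seen and t in replacements:
--             r = replacements[t]
--             if r not in present:
--                 present.add(r)
--                 distinct += 1
--         else:
--             seen.add(t)
--
--     # pass 2: rebuild the list, replacing duplicate replaceable types before j
--     seen = set()
--     out = []
--     for i, t in enumerate(types):
--         if i < j and t in seen and t in replacements:
--             out.append(replacements[t])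
--         else:
--             seen.add(t)
--             out.append(t)
--     return out
-- ===== Notes on version B (the rewrite author's own statement) =====
-- stated objective: faster
-- what changed: B replaces A's single mutating pass that rebuilds set(updated_types) on every iteration with two staged non-mutating passes: pass 1 only computes the cutoff index j, maintaining the distinct count incrementally, and pass 2 rebuilds the output list, replacing duplicate replaceable types before j.
import Mathlib
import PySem

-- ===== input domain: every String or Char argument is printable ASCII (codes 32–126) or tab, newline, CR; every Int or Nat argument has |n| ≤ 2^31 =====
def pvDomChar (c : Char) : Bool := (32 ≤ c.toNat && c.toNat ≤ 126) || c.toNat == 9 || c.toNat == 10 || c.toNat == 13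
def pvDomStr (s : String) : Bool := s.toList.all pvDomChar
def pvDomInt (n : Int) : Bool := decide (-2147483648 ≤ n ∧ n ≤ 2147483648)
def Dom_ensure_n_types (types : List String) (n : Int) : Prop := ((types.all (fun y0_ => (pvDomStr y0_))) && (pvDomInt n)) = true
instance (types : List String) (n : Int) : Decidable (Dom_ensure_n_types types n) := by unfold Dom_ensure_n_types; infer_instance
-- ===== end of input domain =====

-- B replaces A's single mutating pass (which rebuilds set(updated_types) every iteration)
-- by two staged non-mutating passes: pass 1 only finds the cutoff index j with an
-- incrementally maintained distinct count, pass 2 rebuilds the output list; objective: faster.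

-- replacements = {...} (the same dict literal appears in A's source and in Source B; shared helper)
def pyReplacements : PySem.Dict String String :=
  PySem.Dict.ofList [("INTEGER", "BIGINT"), ("VARCHAR(255)", "TEXT"), ("NUMERIC(10, 2)", "FLOAT"), ("UUID", "CHAR(36)")]

-- ===== PORT A =====

-- A's for-loop: k = number of remaining indices, i = current index;
-- `len(set(updated_types)) >= n` is recomputed at the top of every iteration, as in A.
def loopA (n : Int) (reps : PySem.Dict String String) : Nat → Nat → List String → PySem.Set String → List String
  | 0, _, updated, _ => updated
  | k + 1, i, updated, seen =>
    if ((PySem.Set.ofList updated).length : Int) ≥ n then updated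
    else
      let t := updated.getD i ""
      if PySem.Set.contains seen t && (reps.get? t).isSome then
        loopA n reps k (i + 1) (updated.set i ((reps.get? t).getD "")) seen
      else
        loopA n reps k (i + 1) updated (PySem.Set.add seen t)

def ensure_n_types (types : List String) (n : Int) : List String :=
  let unique := PySem.Set.ofList types
  if (unique.length : Int) ≥ n then types
  else loopA n pyReplacements types.length 0 types PySem.Set.empty

-- ===== PORT B =====
-- pass 1 of Source B: walk the ORIGINAL list with an incrementally maintained distinct
-- count and return only the cutoff index j (= len(types) if the loop never breaks)
def findCut (n : Int) (reps : PySem.Dict String String) : Int → PySem.Set String → PySem.Set String → Nat → List String → Nat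
  | _, _, _, i, [] => i
  | distinct, seen, present, i, t :: rest =>
    if distinct ≥ n then i
    else if PySem.Set.contains seen t && (reps.get? t).isSome then
      let r := (reps.get? t).getD ""
      if PySem.Set.contains present r then findCut n reps distinct seen present (i + 1) rest
      else findCut n reps (distinct + 1) seen (PySem.Set.add present r) (i + 1) rest
    else findCut n reps distinct (PySem.Set.add seen t) present (i + 1) rest

-- pass 2 of Source B: rebuild the output, replacing duplicate replaceable types before j
def rebuild (reps : PySem.Dict String String) (j : Nat) : Nat → PySem.Set String → List String → List String
  | _, _, [] => []
  | i, seen, t :: rest =>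
    if i < j ∧ PySem.Set.contains seen t ∧ (reps.get? t).isSome then
      (reps.get? t).getD "" :: rebuild reps j (i + 1) seen rest
    else
      t :: rebuild reps j (i + 1) (PySem.Set.add seen t) rest

def ensure_n_types_alt (types : List String) (n : Int) : List String :=
  let present := PySem.Set.ofList types
  let distinct : Int := present.length
  if distinct ≥ n then types
  else
    let j := findCut n pyReplacements distinct PySem.Set.empty present 0 types
    rebuild pyReplacements j 0 PySem.Set.empty types

-- ===== PRECONDITION & SPEC =====
def Spec_ensure_n_types (types : List String) (n : Int) (out : List String) : Prop := out = ensure_n_types_alt types n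
instance (types : List String) (n : Int) (out : List String) : Decidable (Spec_ensure_n_types types n out) := by unfold Spec_ensure_n_types; infer_instance

-- ===== CLAIM (what is proved, stated in full; the proofs are below) =====
def Claim_equal_ensure_n_types : Prop := ∀ (types : List String) (n : Int), Dom_ensure_n_types types n → Spec_ensure_n_types types n (ensure_n_types types n)

-- ===== LEMMAS AND PROOFS =====

-- two nodup lists with the same members have the same length
theorem len_eq_of_same_mem {s t : List String} (hs : s.Nodup) (ht : t.Nodup)
    (h : ∀ x, x ∈ s ↔ x ∈ t) : s.length = t.length :=
  ((List.perm_ext_iff_of_nodup hs ht).mpr h).length_eq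

theorem findCut_ge (n : Int) (reps : PySem.Dict String String) :
    ∀ (rest : List String) (distinct : Int) (seen present : PySem.Set String) (i : Nat),
      i ≤ findCut n reps distinct seen present i rest := by
  intro rest
  induction rest with
  | nil => intro _ _ _ i; simp [findCut]
  | cons t rest ih =>
    intro distinct seen present i
    simp only [findCut]
    split_ifs with h1 h2 h3
    · exact le_refl i
    · exact le_trans (Nat.le_succ i) (ih _ _ _ _)
    · exact le_trans (Nat.le_succ i) (ih _ _ _ _)
    · exact le_trans (Nat.le_succ i) (ih _ _ _ _)

theorem rebuild_past (reps : PySem.Dict String String) (j : Nat) :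
    ∀ (rest : List String) (i : Nat) (seen : PySem.Set String), j ≤ i →
      rebuild reps j i seen rest = rest := by
  intro rest
  induction rest with
  | nil => intro _ _ _; simp [rebuild]
  | cons t rest ih =>
    intro i seen hji
    simp only [rebuild]
    rw [if_neg (by intro h; exact absurd h.1 (by omega))]
    rw [ih (i + 1) _ (by omega)]

theorem getD_append_len {done rest : List String} {t : String} :
    (done ++ t :: rest).getD done.length "" = t := by
  rw [List.getD_eq_getElem?_getD, List.getElem?_append_right (le_refl done.length)]
  simp

theorem set_append_len {done rest : List String} {t r : String} :
    (done ++ t :: rest).set done.length r = done ++ r :: rest := by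
  rw [List.set_append_right _ _ (le_refl done.length)]
  simp

-- main invariant: A's mutating loop over done ++ rest equals done ++ pass-2 rebuild
-- driven by the pass-1 cutoff, provided `present` tracks the members of the current
-- list and `distinct` its cardinality, and everything in `seen` already occurs in done.
theorem loop_eq (n : Int) (reps : PySem.Dict String String) :
    ∀ (rest done : List String) (seen present : PySem.Set String) (distinct : Int),
    (∀ s ∈ seen, s ∈ done) →
    (∀ x, x ∈ present ↔ x ∈ done ++ rest) →
    present.Nodup →
    distinct = (present.length : Int) →
    loopA n reps rest.length done.length (done ++ rest) seen =
      done ++ rebuild reps (findCut n reps distinct seen present done.length rest) done.length seen rest := by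
  intro rest
  induction rest with
  | nil => intro done seen present distinct _ _ _ _; simp [loopA, rebuild]
  | cons t rest ih =>
    intro done seen present distinct hseen hmem hnd hd
    have hdis : distinct = ((PySem.Set.ofList (done ++ t :: rest)).length : Int) := by
      rw [hd]
      congr 1
      exact len_eq_of_same_mem hnd (PySem.Set.nodup_ofList _)
        (fun x => (hmem x).trans (PySem.Set.mem_ofList _ x).symm)
    simp only [List.length_cons, loopA, findCut, ← hdis, getD_append_len]
    by_cases hn : distinct ≥ n
    · rw [if_pos hn, if_pos hn, rebuild_past reps _ _ _ _ (le_refl _)]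
    · rw [if_neg hn, if_neg hn]
      by_cases hb : (PySem.Set.contains seen t && (reps.get? t).isSome) = true
      · rw [if_pos hb, if_pos hb]
        obtain ⟨r, hr⟩ : ∃ r, r = (reps.get? t).getD "" := ⟨_, rfl⟩
        rw [← hr]
        have hts : t ∈ seen := (PySem.Set.contains_iff seen t).1 (Bool.and_elim_left hb)
        have htd : t ∈ done := hseen t hts
        have hset : (done ++ t :: rest).set done.length r = (done ++ [r]) ++ rest := by
          rw [set_append_len]; simp
        rw [hset]
        by_cases hp : PySem.Set.contains present r = true
        · rw [if_pos hp]
          have hj := findCut_ge n reps rest distinct seen present (done.length + 1)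
          have heq := ih (done ++ [r]) seen present distinct
            (fun s hs => List.mem_append.2 (Or.inl (hseen s hs)))
            (by
              intro x
              rw [hmem x]
              have hrmem : r ∈ done ++ t :: rest := (hmem r).1 ((PySem.Set.contains_iff present r).1 hp)
              simp only [List.append_assoc, List.mem_append, List.mem_cons, List.mem_nil_iff, or_false] at *
              constructor
              · rintro (h | rfl | h)
                · tauto
                · tauto
                · tauto
              · rintro (h | rfl | h)
                · tauto
                · rcases hrmem with h | rfl | h <;> tauto
                · tauto)
            hnd hd
          simp only [List.length_append, List.length_singleton] at heq
          rw [heq]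
          simp only [rebuild]
          rw [if_pos ⟨by omega, Bool.and_elim_left hb, Bool.and_elim_right hb⟩]
          rw [← hr]
          simp
        · rw [if_neg hp]
          have hrnot : r ∉ present := fun hmemr => hp ((PySem.Set.contains_iff present r).2 hmemr)
          have hj := findCut_ge n reps rest (distinct + 1) seen (PySem.Set.add present r) (done.length + 1)
          have heq := ih (done ++ [r]) seen (PySem.Set.add present r) (distinct + 1)
            (fun s hs => List.mem_append.2 (Or.inl (hseen s hs)))
            (by
              intro x
              rw [PySem.Set.mem_add]
              rw [hmem x]
              simp only [List.append_assoc, List.mem_append, List.mem_cons, List.mem_nil_iff, or_false] at *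
              constructor
              · rintro ((h | rfl | h) | rfl) <;> tauto
              · rintro (h | rfl | h) <;> tauto)
            (PySem.Set.nodup_add present r hnd)
            (by
              rw [PySem.Set.add_of_not_mem hrnot, hd, List.length_append, List.length_cons, List.length_nil]
              push_cast; omega)
          simp only [List.length_append, List.length_singleton] at heq
          rw [heq]
          simp only [rebuild]
          rw [if_pos ⟨by omega, Bool.and_elim_left hb, Bool.and_elim_right hb⟩]
          rw [← hr]
          simp
      · rw [if_neg hb, if_neg hb]
        have hcons : done ++ t :: rest = (done ++ [t]) ++ rest := by simp
        rw [hcons]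
        have hj := findCut_ge n reps rest distinct (PySem.Set.add seen t) present (done.length + 1)
        have heq := ih (done ++ [t]) (PySem.Set.add seen t) present distinct
          (by
            intro s hs
            rcases (PySem.Set.mem_add seen t s).1 hs with h1 | rfl
            · exact List.mem_append.2 (Or.inl (hseen s h1))
            · exact List.mem_append.2 (Or.inr (by simp)))
          (by intro x; rw [hmem x]; simp)
          hnd hd
        simp only [List.length_append, List.length_singleton] at heq
        rw [heq]
        simp only [rebuild]
        rw [if_neg (by
          rintro ⟨_, h1, h2⟩
          exact hb (by rw [h1, h2]; rfl))]
        simp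

-- ===== VERDICT (by name: the statement is the Claim_ definition above) =====
theorem ensure_n_types_spec : Claim_equal_ensure_n_types := by
  intro types n _
  unfold Spec_ensure_n_types ensure_n_types ensure_n_types_alt
  by_cases h : (((PySem.Set.ofList types).length : Nat) : Int) ≥ n
  · simp [h]
  · simp only [if_neg h]
    have := loop_eq n pyReplacements types [] PySem.Set.empty (PySem.Set.ofList types) ((PySem.Set.ofList types).length : Int)
      (by intro s hs; simp [PySem.Set.empty] at hs)
      (fun x => by simpa using PySem.Set.mem_ofList types x)
      (PySem.Set.nodup_ofList types) rfl
    simp only [List.nil_append, List.length_nil] at this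
    exact this
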